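-- pv_equiv track=rewrite | github.com/lushushu137/mooc | 四柱汉诺塔.py | func
-- ===== SOURCE A (Python) =====
-- def func(height, start, this, that, end):
--     if height == 1:
--         return 1
--     elif height == 0:
--         return 0
--     else:
--         return func(height - 2, start, this, end, that) + 3 + func(
--             height - 2, that, this, start, end)
-- ===== SOURCE B (Python) =====
-- def func(height, start, this, that, end):
--     # closed form: even h -> 3*(2^(h/2)-1), odd h -> 4*2^((h-1)/2)-3
--     if height % 2 == 0:
--         return 3 * (2 ** (height // 2) - 1)
--     return 4 * 2 ** ((height - 1) // 2) - 3
-- ===== Notes on version B (the rewrite author's own statement) =====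
-- stated objective: faster
-- what changed: replaces the exponential two-branch recursion f(h)=f(h-2)+3+f(h-2) by its closed form 3*(2^(h/2)-1) / 4*2^((h-1)/2)-3 (the peg arguments never affect the count); intended as faster: a timing run measured B 3.76x at the largest size both finished and A timed out at n=16 where B returned, but could not confirm a ratio at the largest size
import Mathlib
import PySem

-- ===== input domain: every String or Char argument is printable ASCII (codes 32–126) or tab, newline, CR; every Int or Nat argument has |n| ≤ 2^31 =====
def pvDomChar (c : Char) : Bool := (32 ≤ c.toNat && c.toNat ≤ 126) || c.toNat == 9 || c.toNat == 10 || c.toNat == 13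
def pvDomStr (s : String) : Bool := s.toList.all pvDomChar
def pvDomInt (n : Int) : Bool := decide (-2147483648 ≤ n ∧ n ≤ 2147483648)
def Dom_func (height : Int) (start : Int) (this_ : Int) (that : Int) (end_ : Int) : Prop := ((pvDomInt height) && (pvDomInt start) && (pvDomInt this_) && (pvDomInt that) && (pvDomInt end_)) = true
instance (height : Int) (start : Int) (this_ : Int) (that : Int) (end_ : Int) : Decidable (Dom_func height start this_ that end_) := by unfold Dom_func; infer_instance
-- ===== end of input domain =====

-- B replaces A's exponential two-branch recursion by the closed form (intended as faster; a timing run saw A time out at n=16 where B returned); A = B for height ≥ 0.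


-- ===== PORT A =====
def func (height : Int) (start : Int) (this_ : Int) (that : Int) (end_ : Int) : Int :=
  if height = 1 then 1
  else if height = 0 then 0
  else if height < 0 then 0  -- totality guard only: Python A never returns here (infinite recursion); outside Pre_func
  else func (height - 2) start this_ end_ that + 3 + func (height - 2) that this_ start end_
termination_by height.toNat
decreasing_by all_goals omega

-- ===== PORT B =====
def func_alt (height : Int) (start : Int) (this_ : Int) (that : Int) (end_ : Int) : Int :=
  if PySem.Int.mod height 2 = 0 then
    3 * (2 ^ (PySem.Int.floordiv height 2).toNat - 1)
  else
    4 * 2 ^ (PySem.Int.floordiv (height - 1) 2).toNat - 3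

-- ===== PRECONDITION & SPEC =====
-- Pre_ excludes negative height, on which the Python A recurses forever (RecursionError).
def Pre_func (height : Int) (start : Int) (this_ : Int) (that : Int) (end_ : Int) : Prop := 0 ≤ height
instance (height : Int) (start : Int) (this_ : Int) (that : Int) (end_ : Int) : Decidable (Pre_func height start this_ that end_) := by unfold Pre_func; infer_instance
def pvWitness_func : Int × Int × Int × Int × Int := (5, 1, 2, 3, 4)
def Spec_func (height : Int) (start : Int) (this_ : Int) (that : Int) (end_ : Int) (out : Int) : Prop := out = func_alt height start this_ that end_
instance (height : Int) (start : Int) (this_ : Int) (that : Int) (end_ : Int) (out : Int) : Decidable (Spec_func height start this_ that end_ out) := by unfold Spec_func; infer_instance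

-- ===== CLAIM (what is proved, stated in full; the proofs are below) =====
def Claim_equal_func : Prop := ∀ (height : Int) (start : Int) (this_ : Int) (that : Int) (end_ : Int), Dom_func height start this_ that end_ → Pre_func height start this_ that end_ → Spec_func height start this_ that end_ (func height start this_ that end_)

-- ===== LEMMAS AND PROOFS =====

-- closed form for A's recursion, by two-step strong induction on the natural height
theorem func_closed (n : Nat) (s t u v : Int) :
    func (n : Int) s t u v = if n % 2 = 0 then 3 * ((2:Int) ^ (n / 2) - 1) else 4 * (2:Int) ^ (n / 2) - 3 := by
  match n with
  | 0 => rw [func]; norm_num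
  | 1 => rw [func]; norm_num
  | (m+2) =>
    rw [func]
    have e : ((m + 2 : Nat) : Int) - 2 = (m : Int) := by push_cast; ring
    rw [if_neg (by push_cast; omega), if_neg (by push_cast; omega), if_neg (by push_cast; omega), e,
        func_closed m s t v u, func_closed m u t s v]
    have hdiv : (m + 2) / 2 = m / 2 + 1 := by omega
    have hmod : (m + 2) % 2 = m % 2 := by omega
    rw [hdiv, hmod]
    by_cases h : m % 2 = 0 <;> simp [h, pow_succ] <;> ring
termination_by n

theorem func_alt_closed (n : Nat) (s t u v : Int) :
    func_alt (n : Int) s t u v = if n % 2 = 0 then 3 * ((2:Int) ^ (n / 2) - 1) else 4 * (2:Int) ^ (n / 2) - 3 := by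
  unfold func_alt
  have hmod : PySem.Int.mod (n : Int) 2 = ((n % 2 : Nat) : Int) := by
    exact_mod_cast PySem.Int.mod_natCast n 2
  have hdiv : PySem.Int.floordiv (n : Int) 2 = ((n / 2 : Nat) : Int) := by
    exact_mod_cast PySem.Int.floordiv_natCast n 2
  by_cases h : n % 2 = 0
  · rw [if_pos (by rw [hmod, h]; rfl), hdiv, Int.toNat_natCast, if_pos h]
  · rw [if_neg (by rw [hmod]; omega), if_neg h]
    have h1 : 1 ≤ n := by omega
    have e : ((n : Int) - 1) = ((n - 1 : Nat) : Int) := by omega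
    have hdiv' : PySem.Int.floordiv ((n - 1 : Nat) : Int) 2 = (((n - 1) / 2 : Nat) : Int) := by
      exact_mod_cast PySem.Int.floordiv_natCast (n - 1) 2
    have e2 : (n - 1) / 2 = n / 2 := by omega
    rw [e, hdiv', Int.toNat_natCast, e2]

-- ===== VERDICT (by name: the statement is the Claim_ definition above) =====
theorem func_spec : Claim_equal_func := by
  intro height start this_ that end_ _ hpre
  unfold Pre_func at hpre
  unfold Spec_func
  have h : height = ((height.toNat : Nat) : Int) := by omega
  rw [h, func_closed, func_alt_closed]
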